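-- pv_equiv track=rewrite | github.com/belo4ya/yandex-good-night | habr/habr_5.py | max_num_guests
-- ===== SOURCE A (Python) =====
-- from collections import defaultdict
--
-- def max_num_guests(guests):
--     res = 0
--
--     # для каждого дня посчитаем, сколько приехало и сколько отъехало
--     arriving = defaultdict(int)
--     leaving = defaultdict(int)
--
--     for guest in guests:  # O(n)
--         arriving[guest[0]] += 1
--         leaving[guest[1]] += 1
--
--     current = 0
--     # едем по дням в порядке увеличения, добавлем приехавших и убавляем уехавших,
--     # считаем сколько стало
--     for day in sorted(set(arriving.keys()).union(set(leaving.keys()))):  # O(n*log(n)) + O(n)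
--         current -= leaving[day]
--         current += arriving[day]
--
--         if current > res:
--             res = current
--
--     return res
-- ===== SOURCE B (Python) =====
-- def max_num_guests(guests):
--     # two-pointer sweep over independently sorted arrival and departure days
--     arrivals = sorted(g[0] for g in guests)
--     departures = sorted(g[1] for g in guests)
--     res = current = j = 0
--     n = len(departures)
--     for a in arrivals:
--         while j < n and departures[j] <= a:
--             current -= 1
--             j += 1
--         current += 1
--         if current > res:
--             res = current
--     return res
-- ===== Notes on version B (the rewrite author's own statement) =====
-- stated objective: alternative
-- what changed: Replaced A's two day-keyed defaultdict counters plus a sweep over the sorted set-union of all event days by a two-pointer merge of the independently sorted arrival and departure day lists with a running occupancy counter.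
import Mathlib
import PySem

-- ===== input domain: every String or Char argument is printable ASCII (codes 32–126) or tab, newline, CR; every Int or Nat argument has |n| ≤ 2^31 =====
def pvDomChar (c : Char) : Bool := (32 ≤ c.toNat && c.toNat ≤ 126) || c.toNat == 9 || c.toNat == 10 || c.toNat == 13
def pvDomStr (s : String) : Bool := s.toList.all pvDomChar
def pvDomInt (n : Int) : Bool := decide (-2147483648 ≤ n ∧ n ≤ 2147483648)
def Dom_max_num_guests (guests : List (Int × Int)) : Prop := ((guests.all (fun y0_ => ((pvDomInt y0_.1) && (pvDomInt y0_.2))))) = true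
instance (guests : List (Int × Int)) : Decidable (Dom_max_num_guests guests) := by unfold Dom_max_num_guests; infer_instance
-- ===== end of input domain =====

-- B replaces A's two day-keyed defaultdicts and sorted set-union sweep by a two-pointer merge
-- of the independently sorted arrival and departure day lists (objective: alternative).

-- ===== PORT A =====
-- Note: in the sweep loop the Python defaultdict reads 'leaving[day]'/'arriving[day]' insert a
-- missing key with value 0; that mutation never changes any value the loop later reads, so the
-- port reads with getD _ 0 (exact for every value computed).
def max_num_guests (guests : List (Int × Int)) : Int :=
  let cnts := guests.foldl
    (fun (s : PySem.Dict Int Int × PySem.Dict Int Int) guest =>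
      (s.1.modify guest.1 0 (· + 1), s.2.modify guest.2 0 (· + 1)))
    (PySem.Dict.empty, PySem.Dict.empty)
  let arriving := cnts.1
  let leaving := cnts.2
  let days := PySem.List.sorted
    (PySem.Set.union (PySem.Set.ofList arriving.keys) (PySem.Set.ofList leaving.keys))
    (fun d => d) false
  let fin := days.foldl
    (fun (s : Int × Int) day =>
      let current := s.2 - leaving.getD day 0 + arriving.getD day 0
      (if current > s.1 then current else s.1, current))
    (0, 0)
  fin.1

-- ===== PORT B =====
-- 'while j < n and departures[j] <= a: current -= 1; j += 1' — the port consumes the remaining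
-- departures suffix instead of moving the index j over the fixed list (same values step for step).
def pvDropLe (a : Int) : Int → List Int → Int × List Int
  | cur, [] => (cur, [])
  | cur, d :: ds => if d ≤ a then pvDropLe a (cur - 1) ds else (cur, d :: ds)

-- the 'for a in arrivals' loop of Source B, state (res, current, remaining departures)
def pvBGo : Int → Int → List Int → List Int → Int
  | res, _, [], _ => res
  | res, cur, a :: as, deps =>
    let p := pvDropLe a cur deps
    let c := p.1 + 1
    pvBGo (if c > res then c else res) c as p.2

def max_num_guests_alt (guests : List (Int × Int)) : Int :=
  let arrivals := PySem.List.sorted (guests.map Prod.fst) (fun d => d) false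
  let departures := PySem.List.sorted (guests.map Prod.snd) (fun d => d) false
  pvBGo 0 0 arrivals departures

-- ===== PRECONDITION & SPEC =====
def Spec_max_num_guests (guests : List (Int × Int)) (out : Int) : Prop := out = max_num_guests_alt guests
instance (guests : List (Int × Int)) (out : Int) : Decidable (Spec_max_num_guests guests out) := by unfold Spec_max_num_guests; infer_instance

-- ===== CLAIM (what is proved, stated in full; the proofs are below) =====
def Claim_equal_max_num_guests : Prop := ∀ (guests : List (Int × Int)), Dom_max_num_guests guests → Spec_max_num_guests guests (max_num_guests guests)

-- ===== LEMMAS AND PROOFS =====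

-- number of elements of xs that are ≤ d, as an Int
def pvCntLe (xs : List Int) (d : Int) : Int := (xs.countP (fun x => decide (x ≤ d)) : Int)

-- net number of guests present at the end of day d
def pvF (arr dep : List Int) (d : Int) : Int := pvCntLe arr d - pvCntLe dep d

-- number of elements of xs lying in the list P
def pvCntIn (xs P : List Int) : Int := (xs.countP (fun x => decide (x ∈ P)) : Int)

-- the successive values of 'current' taken at the arrivals (B's loop), n arrivals already done
def pvFvals (D : List Int) : Int → List Int → List Int
  | _, [] => []
  | n, a :: as => (n + 1 - pvCntLe D a) :: pvFvals D (n + 1) as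

lemma pv_if_gt (a b : Int) : (if b > a then b else a) = max a b := by
  by_cases h : b > a <;> simp [h] <;> omega

lemma pv_foldl_max_le (b : Int) : ∀ (l : List Int) (r : Int), r ≤ b → (∀ x ∈ l, x ≤ b) → l.foldl max r ≤ b := by
  intro l
  induction l with
  | nil => intro r hr _; simpa using hr
  | cons x t ih =>
    intro r hr hall
    simp only [List.foldl_cons]
    exact ih _ (max_le hr (hall x (by simp))) (fun y hy => hall y (by simp [hy]))

lemma pv_foldA_split : ∀ (gs : List (Int × Int)) (d1 d2 : PySem.Dict Int Int),
    gs.foldl (fun s g => (s.1.modify g.1 0 (· + 1), s.2.modify g.2 0 (· + 1))) (d1, d2)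
    = ((gs.map Prod.fst).foldl (fun d x => d.modify x 0 (· + 1)) d1,
       (gs.map Prod.snd).foldl (fun d x => d.modify x 0 (· + 1)) d2) := by
  intro gs
  induction gs with
  | nil => intro d1 d2; rfl
  | cons g t ih => intro d1 d2; simp [ih]

lemma pv_countP_or (p q : Int → Bool) : ∀ xs : List Int, (∀ x ∈ xs, ¬(p x = true ∧ q x = true)) →
    xs.countP (fun x => p x || q x) = xs.countP p + xs.countP q := by
  intro xs
  induction xs with
  | nil => intro _; simp
  | cons x t ih =>
    intro h
    have ht := ih (fun y hy => h y (by simp [hy]))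
    have hx := h x (by simp)
    simp only [List.countP_cons, ht]
    cases hp : p x <;> cases hq : q x <;> simp [hp, hq] at hx ⊢ <;> omega

-- counting elements ≤ d splits into elements in P and copies of d, when P < d and
-- every element of xs lies in P or in {d} ∪ S with S > d
lemma pv_cnt_step (xs P : List Int) (d : Int) (S : List Int)
    (hPd : ∀ x ∈ P, x < d) (hSd : ∀ y ∈ S, d < y)
    (hcomp : ∀ x ∈ xs, x ∈ P ∨ x ∈ d :: S) :
    pvCntLe xs d = pvCntIn xs P + (xs.count d : Int) := by
  have hcong : ∀ x ∈ xs, (decide (x ≤ d) = true ↔ ((fun x => decide (x ∈ P) || decide (x = d)) x) = true) := by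
    intro x hx
    rcases hcomp x hx with h | h
    · have hlt := hPd x h
      simp [h, le_of_lt hlt]
    · rcases List.mem_cons.mp h with rfl | h'
      · simp
      · have hgt := hSd x h'
        have h1 : ¬ x ≤ d := by omega
        have h2 : ¬ x = d := by omega
        have h3 : x ∉ P := fun hxP => absurd (hPd x hxP) (by omega)
        simp [h1, h2, h3]
  have hdisj : ∀ x ∈ xs, ¬((fun x => decide (x ∈ P)) x = true ∧ (fun x => decide (x = d)) x = true) := by
    intro x _ ⟨hP, hE⟩
    simp at hP hE
    subst hE
    exact absurd (hPd x hP) (by omega)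
  have hcnt : xs.count d = xs.countP (fun x => decide (x = d)) := by
    simp only [List.count_eq_countP]
    exact List.countP_congr (fun x _ => by simp)
  unfold pvCntLe pvCntIn
  rw [List.countP_congr hcong, pv_countP_or _ _ xs hdisj, hcnt]
  push_cast
  ring

lemma pv_cntIn_append (xs P : List Int) (d : Int) (hPd : ∀ x ∈ P, x < d) :
    pvCntIn xs (P ++ [d]) = pvCntIn xs P + (xs.count d : Int) := by
  have hcong : ∀ x ∈ xs, (decide (x ∈ P ++ [d]) = true ↔ ((fun x => decide (x ∈ P) || decide (x = d)) x) = true) := by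
    intro x _
    simp [List.mem_append]
  have hdisj : ∀ x ∈ xs, ¬((fun x => decide (x ∈ P)) x = true ∧ (fun x => decide (x = d)) x = true) := by
    intro x _ ⟨hP, hE⟩
    simp at hP hE
    subst hE
    exact absurd (hPd x hP) (by omega)
  have hcnt : xs.count d = xs.countP (fun x => decide (x = d)) := by
    simp only [List.count_eq_countP]
    exact List.countP_congr (fun x _ => by simp)
  unfold pvCntIn
  rw [List.countP_congr hcong, pv_countP_or _ _ xs hdisj, hcnt]
  push_cast
  ring

-- A's sweep over the strictly increasing day list computes foldl max over the day values pvF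
lemma pv_sweepA (arr dep : List Int) : ∀ (S P : List Int) (res : Int),
    S.Pairwise (· < ·) →
    (∀ x ∈ P, ∀ y ∈ S, x < y) →
    (∀ x ∈ arr, x ∈ P ∨ x ∈ S) →
    (∀ x ∈ dep, x ∈ P ∨ x ∈ S) →
    (S.foldl (fun (s : Int × Int) day =>
        (if s.2 - (dep.count day : Int) + (arr.count day : Int) > s.1
         then s.2 - (dep.count day : Int) + (arr.count day : Int) else s.1,
         s.2 - (dep.count day : Int) + (arr.count day : Int)))
      (res, pvCntIn arr P - pvCntIn dep P)).1
    = (S.map (pvF arr dep)).foldl max res := by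
  intro S
  induction S with
  | nil => intro P res _ _ _ _; simp
  | cons d S' ih =>
    intro P res hp hPS hca hcd
    have hd' : ∀ y ∈ S', d < y := (List.pairwise_cons.mp hp).1
    have hPd : ∀ x ∈ P, x < d := fun x hx => hPS x hx d (by simp)
    have hstepA := pv_cnt_step arr P d S' hPd hd' hca
    have hstepD := pv_cnt_step dep P d S' hPd hd' hcd
    have hcur : pvCntIn arr P - pvCntIn dep P - (dep.count d : Int) + (arr.count d : Int)
        = pvF arr dep d := by
      unfold pvF; omega
    have hP' : pvF arr dep d = pvCntIn arr (P ++ [d]) - pvCntIn dep (P ++ [d]) := by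
      rw [pv_cntIn_append arr P d hPd, pv_cntIn_append dep P d hPd]
      unfold pvF; omega
    simp only [List.foldl_cons, List.map_cons, hcur]
    rw [pv_if_gt, hP']
    exact ih (P ++ [d]) _ (List.pairwise_cons.mp hp).2
      (by
        intro x hx y hy
        rcases List.mem_append.mp hx with h | h
        · exact hPS x h y (by simp [hy])
        · simp at h; subst h; exact hd' y hy)
      (by
        intro x hx
        rcases hca x hx with h | h
        · exact Or.inl (by simp [h])
        · rcases List.mem_cons.mp h with rfl | h'
          · exact Or.inl (by simp)
          · exact Or.inr h')
      (by
        intro x hx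
        rcases hcd x hx with h | h
        · exact Or.inl (by simp [h])
        · rcases List.mem_cons.mp h with rfl | h'
          · exact Or.inl (by simp)
          · exact Or.inr h')

-- on a sorted list, dropWhile/takeWhile (≤ a) are drop/take of the count of elements ≤ a
lemma pv_dropWhile_sorted (a : Int) : ∀ ys : List Int, ys.Pairwise (· ≤ ·) →
    ys.dropWhile (fun x => decide (x ≤ a)) = ys.drop (ys.countP (fun x => decide (x ≤ a))) := by
  intro ys
  induction ys with
  | nil => intro _; simp
  | cons y t ih =>
    intro hp
    by_cases hy : y ≤ a
    · simp only [List.dropWhile_cons, List.countP_cons, hy, decide_true]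
      simp only [ih (List.pairwise_cons.mp hp).2]
      simp
    · have h0 : (y :: t).countP (fun x => decide (x ≤ a)) = 0 := by
        rw [List.countP_eq_zero]
        intro x hx
        rcases List.mem_cons.mp hx with rfl | hx'
        · simpa using hy
        · have := (List.pairwise_cons.mp hp).1 x hx'
          simp; omega
      rw [h0]
      simp [hy]

lemma pv_takeWhile_sorted (a : Int) : ∀ ys : List Int, ys.Pairwise (· ≤ ·) →
    ys.takeWhile (fun x => decide (x ≤ a)) = ys.take (ys.countP (fun x => decide (x ≤ a))) := by
  intro ys
  induction ys with
  | nil => intro _; simp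
  | cons y t ih =>
    intro hp
    by_cases hy : y ≤ a
    · simp only [List.takeWhile_cons, List.countP_cons, hy, decide_true]
      simp [ih (List.pairwise_cons.mp hp).2]
    · have h0 : (y :: t).countP (fun x => decide (x ≤ a)) = 0 := by
        rw [List.countP_eq_zero]
        intro x hx
        rcases List.mem_cons.mp hx with rfl | hx'
        · simpa using hy
        · have := (List.pairwise_cons.mp hp).1 x hx'
          simp; omega
      rw [h0]
      simp [hy]

lemma pv_dropLe_eq (a : Int) : ∀ (deps : List Int) (cur : Int), deps.Pairwise (· ≤ ·) →
    pvDropLe a cur deps = (cur - (deps.countP (fun x => decide (x ≤ a)) : Int),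
                           deps.dropWhile (fun x => decide (x ≤ a))) := by
  intro deps
  induction deps with
  | nil => intro cur _; simp [pvDropLe]
  | cons d ds ih =>
    intro cur hp
    by_cases hd : d ≤ a
    · rw [show pvDropLe a cur (d :: ds) = pvDropLe a (cur - 1) ds by simp [pvDropLe, hd]]
      rw [ih (cur - 1) (List.pairwise_cons.mp hp).2]
      simp only [List.countP_cons, List.dropWhile_cons, hd, decide_true, if_true, Prod.mk.injEq]
      exact ⟨by push_cast; ring, trivial⟩
    · have h0 : (d :: ds).countP (fun x => decide (x ≤ a)) = 0 := by
        rw [List.countP_eq_zero]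
        intro x hx
        rcases List.mem_cons.mp hx with rfl | hx'
        · simpa using hd
        · have := (List.pairwise_cons.mp hp).1 x hx'
          simp; omega
      rw [h0]
      simp [pvDropLe, hd]

-- B's loop computes foldl max over the pvFvals value list
lemma pv_bGo_eq (D : List Int) (hD : D.Pairwise (· ≤ ·)) :
    ∀ (as : List Int) (j : Nat) (res cur : Int),
    as.Pairwise (· ≤ ·) →
    j ≤ D.length →
    (∀ a ∈ as, ∀ x ∈ D.take j, x ≤ a) →
    pvBGo res cur as (D.drop j) = (pvFvals D (cur + j) as).foldl max res := by
  intro as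
  induction as with
  | nil => intro j res cur _ _ _; simp [pvBGo, pvFvals]
  | cons a as' ih =>
    intro j res cur hpas hj htk
    have hdeps : (D.drop j).Pairwise (· ≤ ·) := hD.sublist (List.drop_sublist _ _)
    have htkj : ∀ x ∈ D.take j, x ≤ a := htk a (by simp)
    have hlenj : (D.take j).length = j := by rw [List.length_take]; omega
    have htake_cnt : (D.take j).countP (fun x => decide (x ≤ a)) = j := by
      have h1 : (D.take j).countP (fun x => decide (x ≤ a)) = (D.take j).length :=
        List.countP_eq_length.mpr (fun x hx => by simpa using htkj x hx)
      omega
    have hkey : D.countP (fun x => decide (x ≤ a))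
        = j + (D.drop j).countP (fun x => decide (x ≤ a)) := by
      conv_lhs => rw [← List.take_append_drop j D, List.countP_append]
      omega
    have hjt : j + (D.drop j).countP (fun x => decide (x ≤ a)) ≤ D.length := by
      have := List.countP_le_length (l := D) (p := fun x => decide (x ≤ a))
      omega
    have htk' : ∀ a' ∈ as', ∀ x ∈ D.take (j + (D.drop j).countP (fun x => decide (x ≤ a))), x ≤ a' := by
      intro a' ha' x hx
      rw [List.take_add] at hx
      rcases List.mem_append.mp hx with h | h
      · exact htk a' (by simp [ha']) x h
      · rw [← pv_takeWhile_sorted a (D.drop j) hdeps] at h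
        have hxa : x ≤ a := by simpa using List.mem_takeWhile_imp h
        have haa' : a ≤ a' := (List.pairwise_cons.mp hpas).1 a' ha'
        omega
    simp only [pvBGo]
    rw [pv_dropLe_eq a (D.drop j) cur hdeps]
    dsimp only
    rw [pv_dropWhile_sorted a (D.drop j) hdeps, List.drop_drop]
    rw [ih (j + (D.drop j).countP (fun x => decide (x ≤ a))) _ _
        (List.pairwise_cons.mp hpas).2 hjt htk']
    have hc : cur - ((D.drop j).countP (fun x => decide (x ≤ a)) : Int) + 1
        = cur + (j : Int) + 1 - pvCntLe D a := by
      unfold pvCntLe; rw [hkey]; push_cast; ring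
    have harg : (cur - ((D.drop j).countP (fun x => decide (x ≤ a)) : Int) + 1)
          + ((j + (D.drop j).countP (fun x => decide (x ≤ a)) : Nat) : Int)
        = (cur + (j : Int)) + 1 := by
      push_cast; ring
    simp only [pvFvals, List.foldl_cons]
    rw [pv_if_gt, harg, hc]

lemma pv_fvals_length (D : List Int) : ∀ (as : List Int) (n : Int), (pvFvals D n as).length = as.length := by
  intro as
  induction as with
  | nil => intro n; rfl
  | cons a t ih => intro n; simp [pvFvals, ih]

lemma pv_fvals_getElem (D : List Int) : ∀ (as : List Int) (n : Int) (i : Nat) (h : i < as.length),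
    (pvFvals D n as)[i]'(by rw [pv_fvals_length]; exact h) = n + (i : Int) + 1 - pvCntLe D as[i] := by
  intro as
  induction as with
  | nil => intro n i h; simp at h
  | cons a t ih =>
    intro n i h
    cases i with
    | zero => simp [pvFvals]
    | succ k =>
      have := ih (n + 1) k (by simpa using h)
      simp only [pvFvals, List.getElem_cons_succ]
      rw [this]
      push_cast
      ring

-- in a (≤)-sorted list, the first countP-(≤ d) positions hold elements ≤ d …
lemma pv_sorted_getElem_le (d : Int) (xs : List Int) (hp : xs.Pairwise (· ≤ ·))
    (i : Nat) (h : i < xs.length) (hcnt : i < xs.countP (fun x => decide (x ≤ d))) : xs[i] ≤ d := by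
  by_contra hgt
  push Not at hgt
  have hup : xs.countP (fun x => decide (x ≤ d)) ≤ i := by
    conv_lhs => rw [← List.take_append_drop i xs, List.countP_append]
    have h1 : (xs.take i).countP (fun x => decide (x ≤ d)) ≤ i := by
      have := List.countP_le_length (l := xs.take i) (p := fun x => decide (x ≤ d))
      rw [List.length_take] at this
      omega
    have h2 : (xs.drop i).countP (fun x => decide (x ≤ d)) = 0 := by
      rw [List.countP_eq_zero]
      intro x hx
      obtain ⟨j, hj, rfl⟩ := List.mem_iff_getElem.mp hx
      have hjl : i + j < xs.length := by rw [List.length_drop] at hj; omega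
      have hxe : (xs.drop i)[j] = xs[i + j]'hjl := by rw [List.getElem_drop]
      rw [hxe]
      have hij : xs[i] ≤ xs[i + j]'hjl := by
        rcases Nat.eq_or_lt_of_le (Nat.le_add_right i j) with he | hl
        · simp [← he]
        · exact List.pairwise_iff_getElem.mp hp i (i + j) h hjl hl
      simp; omega
    omega
  omega

-- … and conversely an element ≤ d at position i forces at least i+1 such elements
lemma pv_sorted_countP_ge (d : Int) (xs : List Int) (hp : xs.Pairwise (· ≤ ·))
    (i : Nat) (h : i < xs.length) (hle : xs[i] ≤ d) : i + 1 ≤ xs.countP (fun x => decide (x ≤ d)) := by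
  conv_rhs => rw [← List.take_append_drop (i + 1) xs, List.countP_append]
  have hlen1 : (xs.take (i + 1)).length = i + 1 := by rw [List.length_take]; omega
  have h1 : (xs.take (i + 1)).countP (fun x => decide (x ≤ d)) = (xs.take (i + 1)).length := by
    rw [List.countP_eq_length]
    intro x hx
    obtain ⟨j, hj, rfl⟩ := List.mem_iff_getElem.mp hx
    have hjlen : j < xs.length := by rw [List.length_take] at hj; omega
    have hxe : (xs.take (i + 1))[j] = xs[j]'hjlen := by rw [List.getElem_take]
    rw [hxe]
    have hji : xs[j]'hjlen ≤ xs[i] := by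
      rcases Nat.lt_or_ge j i with hl | hge
      · exact List.pairwise_iff_getElem.mp hp j i (by omega) h hl
      · have hji' : j = i := by rw [List.length_take] at hj; omega
        subst hji'; exact le_refl _
    simp; omega
  omega

-- the two maxima agree: max over event days of pvF = max over B's current values
lemma pv_bridge (arr dep days : List Int)
    (hdays : ∀ x : Int, x ∈ days ↔ x ∈ arr ∨ x ∈ dep) :
    ((days.map (pvF arr dep)).foldl max 0)
    = (pvFvals (PySem.List.sorted dep (fun d => d) false) 0
         (PySem.List.sorted arr (fun d => d) false)).foldl max 0 := by
  set As := PySem.List.sorted arr (fun d => d) false with hAs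
  set Ds := PySem.List.sorted dep (fun d => d) false with hDs
  have hApm : As.Perm arr := PySem.List.sorted_perm arr _ false
  have hDpm : Ds.Perm dep := PySem.List.sorted_perm dep _ false
  have hApw : As.Pairwise (· ≤ ·) := PySem.List.sorted_pairwise arr (fun d => d)
  have hAlen : As.length = arr.length := hApm.length_eq
  have hFlen : (pvFvals Ds 0 As).length = As.length := pv_fvals_length Ds As 0
  -- every B value is bounded by some day value, and vice versa
  apply le_antisymm
  · apply pv_foldl_max_le
    · exact (PySem.List.le_foldl_max (pvFvals Ds 0 As) 0).1
    · intro v hv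
      obtain ⟨dday, hd, rfl⟩ := List.mem_map.mp hv
      rcases Nat.eq_zero_or_pos (arr.countP (fun x => decide (x ≤ dday))) with hk | hk
      · -- no arrival up to this day: the value is ≤ 0
        have : pvF arr dep dday ≤ 0 := by
          unfold pvF pvCntLe
          rw [hk]
          have : (0 : Int) ≤ (dep.countP (fun x => decide (x ≤ dday)) : Int) := by positivity
          omega
        exact le_trans this (PySem.List.le_foldl_max (pvFvals Ds 0 As) 0).1
      · set k := arr.countP (fun x => decide (x ≤ dday)) with hkdef
        have hkA : As.countP (fun x => decide (x ≤ dday)) = k := hApm.countP_eq _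
        have hi : k - 1 < As.length := by
          have := List.countP_le_length (l := As) (p := fun x => decide (x ≤ dday))
          omega
        have hAsle : As[k - 1] ≤ dday :=
          pv_sorted_getElem_le dday As hApw (k - 1) hi (by omega)
        have hvi : (pvFvals Ds 0 As)[k - 1]'(by rw [hFlen]; exact hi)
            = 0 + ((k - 1 : Nat) : Int) + 1 - pvCntLe Ds As[k - 1] :=
          pv_fvals_getElem Ds As 0 (k - 1) hi
        have hmono : pvCntLe Ds As[k - 1] ≤ pvCntLe dep dday := by
          unfold pvCntLe
          rw [hDpm.countP_eq]
          have := List.countP_mono_left (l := dep)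
            (p := fun x => decide (x ≤ As[k - 1])) (q := fun x => decide (x ≤ dday))
            (by intro x _ hx; simp at hx ⊢; omega)
          omega
        have hF : pvF arr dep dday ≤ (pvFvals Ds 0 As)[k - 1]'(by rw [hFlen]; exact hi) := by
          rw [hvi]
          unfold pvF pvCntLe
          unfold pvCntLe at hmono
          rw [← hkdef]
          omega
        exact le_trans hF ((PySem.List.le_foldl_max (pvFvals Ds 0 As) 0).2 _ (List.getElem_mem _))
  · apply pv_foldl_max_le
    · exact (PySem.List.le_foldl_max ((days.map (pvF arr dep))) 0).1
    · intro v hv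
      obtain ⟨i, hiF, rfl⟩ := List.mem_iff_getElem.mp hv
      have hi : i < As.length := by rw [hFlen] at hiF; exact hiF
      have hvi : (pvFvals Ds 0 As)[i]'hiF = 0 + (i : Int) + 1 - pvCntLe Ds As[i] :=
        pv_fvals_getElem Ds As 0 i hi
      have hmem : As[i] ∈ days := (hdays As[i]).mpr (Or.inl (hApm.mem_iff.mp (List.getElem_mem _)))
      have hcnt : i + 1 ≤ arr.countP (fun x => decide (x ≤ As[i])) := by
        rw [← hApm.countP_eq]
        exact pv_sorted_countP_ge As[i] As hApw i hi (le_refl _)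
      have hF : (pvFvals Ds 0 As)[i]'hiF ≤ pvF arr dep As[i] := by
        rw [hvi]
        unfold pvF pvCntLe
        rw [show (Ds.countP (fun x => decide (x ≤ As[i])) : Int)
              = (dep.countP (fun x => decide (x ≤ As[i])) : Int) by rw [hDpm.countP_eq]]
        omega
      refine le_trans hF ?_
      exact (PySem.List.le_foldl_max ((days.map (pvF arr dep))) 0).2 _
        (List.mem_map.mpr ⟨As[i], hmem, rfl⟩)

-- ===== VERDICT (by name: the statement is the Claim_ definition above) =====
theorem max_num_guests_spec : Claim_equal_max_num_guests := by
  intro guests _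
  unfold Spec_max_num_guests max_num_guests max_num_guests_alt
  simp only [pv_foldA_split, ← PySem.Dict.counter_eq_foldl,
             PySem.Dict.getD_counter, PySem.Dict.keys_counter, PySem.Set.ofList_ofList]
  have hunion : PySem.Set.union (PySem.Set.ofList (guests.map Prod.fst))
        (PySem.Set.ofList (guests.map Prod.snd))
      = PySem.Set.ofList (guests.map Prod.fst ++ PySem.Set.ofList (guests.map Prod.snd)) := by
    rw [PySem.Set.ofList_append]
    rfl
  rw [hunion]
  set arr := guests.map Prod.fst with harr
  set dep := guests.map Prod.snd with hdep
  set days := PySem.List.sorted (PySem.Set.ofList (arr ++ PySem.Set.ofList dep)) (fun d => d) false with hdaysdef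
  have hmem : ∀ x : Int, x ∈ days ↔ x ∈ arr ∨ x ∈ dep := by
    intro x
    rw [hdaysdef, PySem.List.mem_sorted, PySem.Set.mem_ofList, List.mem_append, PySem.Set.mem_ofList]
  have hpw : days.Pairwise (· < ·) := PySem.List.sorted_ofList_pairwise_lt _
  have hA := pv_sweepA arr dep days [] 0 hpw (by simp)
      (fun x hx => Or.inr ((hmem x).mpr (Or.inl hx)))
      (fun x hx => Or.inr ((hmem x).mpr (Or.inr hx)))
  rw [show pvCntIn arr [] - pvCntIn dep [] = (0 : Int) from by simp [pvCntIn]] at hA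
  rw [hA, pv_bridge arr dep days hmem]
  have hApw : (PySem.List.sorted arr (fun d => d) false).Pairwise (· ≤ ·) :=
    PySem.List.sorted_pairwise arr (fun d => d)
  have hDpw : (PySem.List.sorted dep (fun d => d) false).Pairwise (· ≤ ·) :=
    PySem.List.sorted_pairwise dep (fun d => d)
  have hB := pv_bGo_eq (PySem.List.sorted dep (fun d => d) false) hDpw
      (PySem.List.sorted arr (fun d => d) false) 0 0 0 hApw (by simp) (by simp)
  simp only [List.drop_zero] at hB
  rw [hB]
  norm_num
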